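-- pv_equiv track=rewrite | github.com/ishandutta2007/codeforces | sevlll777/normal/1143/B.py | f
-- ===== SOURCE A (Python) =====
-- def f(n):
--     if n < 10:
--         return n
--     else:
--         s = list(str(n))
--         s = list(map(int, s))
--         q = max(1, (s[0] - 1)) * 9 ** (len(s) - 1)
--         w = s[0] * f(n % (10 ** (len(s) - 1)))
--         return max(q, w)
-- ===== SOURCE B (Python) =====
-- def f(n):
--     if n < 10:
--         return n
--     s = [int(c) for c in str(n)]
--     best, p, rem = 0, 1, len(s)
--     for d in s:
--         rem -= 1
--         best = max(best, p * max(1, d - 1) * 9 ** rem)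
--         p *= d
--     return max(best, p)
-- ===== Notes on version B (the rewrite author's own statement) =====
-- stated objective: alternative
-- what changed: A's self-recursion on n % 10**(len-1) is replaced by a single iterative pass over the digit list of n that maintains a running prefix product and takes the maximum of per-position candidates prefix*max(1,d-1)*9**rem and the all-digits product.
import Mathlib
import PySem

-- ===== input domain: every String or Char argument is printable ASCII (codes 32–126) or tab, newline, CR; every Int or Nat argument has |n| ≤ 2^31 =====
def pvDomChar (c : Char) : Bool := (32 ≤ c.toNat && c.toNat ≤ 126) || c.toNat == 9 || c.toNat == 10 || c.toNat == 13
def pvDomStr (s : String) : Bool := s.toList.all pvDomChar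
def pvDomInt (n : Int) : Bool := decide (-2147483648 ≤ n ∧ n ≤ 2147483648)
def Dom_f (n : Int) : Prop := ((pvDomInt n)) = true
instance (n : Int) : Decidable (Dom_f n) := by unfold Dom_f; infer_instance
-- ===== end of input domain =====

-- B replaces A's digit recursion by one iterative pass over the digits of n maintaining a prefix
-- product (objective: alternative — a different decomposition of the same O(number of digits) task).

-- ===== PORT A =====
-- shared digit extraction: both Pythons compute the digit list of str(n)
-- (A: list(map(int, list(str(n)))), B: [int(c) for c in str(n)]).
-- int(c) on a one-character string is PySem.Int.ofChars? [c]; the .getD 0 default is never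
-- reached on the inputs where this helper is used (every character of str(n) for n ≥ 10 is a
-- decimal digit, on which int(c) returns a value).
def pyDigits (n : Int) : List Int :=
  (PySem.Int.toChars n).map (fun c => (PySem.Int.ofChars? [c]).getD 0)

-- bridge: Nat.toDigitsCore (the engine of str(n)) produces Mathlib's Nat.digits, reversed
lemma pvToDigitsCore_eq : ∀ (fuel m : Nat) (l : List Char), 1 ≤ m → m < 10 ^ fuel →
    Nat.toDigitsCore 10 fuel m l = (Nat.digits 10 m).reverse.map Nat.digitChar ++ l := by
  intro fuel
  induction fuel with
  | zero => intro m l h1 h2; simp at h2; omega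
  | succ fuel ih =>
    intro m l h1 h2
    rw [Nat.toDigitsCore]
    by_cases h : m / 10 = 0
    · have hm10 : m < 10 := by omega
      rw [if_pos h, Nat.digits_of_lt 10 m (by omega) hm10]
      simp [Nat.mod_eq_of_lt hm10]
    · have hdiv : m / 10 < 10 ^ fuel := by
        have : 10 ^ (fuel + 1) = 10 ^ fuel * 10 := by ring
        omega
      rw [if_neg h, ih (m / 10) _ (by omega) hdiv,
        show Nat.digits 10 m = m % 10 :: Nat.digits 10 (m / 10) from
          Nat.digits_def' (by norm_num) (by omega)]
      simp

lemma pvToChars_eq (m : Nat) (h : 1 ≤ m) :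
    PySem.Int.toChars (m : Int) = (Nat.digits 10 m).reverse.map Nat.digitChar := by
  have hlt : ¬ ((m : Int) < 0) := by omega
  have hfuel : m < 10 ^ (m + 1) := by
    calc m < 10 ^ m := Nat.lt_pow_self (by norm_num)
    _ ≤ 10 ^ (m + 1) := Nat.pow_le_pow_right (by norm_num) (by omega)
  simp only [PySem.Int.toChars, if_neg hlt, Int.toNat_natCast, Nat.toDigits,
    pvToDigitsCore_eq (m + 1) m [] h hfuel, List.append_nil]

lemma pvDigitChar_int (d : Nat) (h : d < 10) :
    (PySem.Int.ofChars? [Nat.digitChar d]).getD 0 = (d : Int) := by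
  interval_cases d <;> decide

lemma pvPyDigits_eq (m : Nat) (h : 1 ≤ m) :
    pyDigits (m : Int) = (Nat.digits 10 m).reverse.map (Nat.cast : ℕ → ℤ) := by
  unfold pyDigits
  rw [pvToChars_eq m h, List.map_map]
  apply List.map_congr_left
  intro d hd
  have hd10 : d < 10 := Nat.digits_lt_base (by norm_num) (List.mem_reverse.mp hd)
  simpa [Function.comp] using pvDigitChar_int d hd10

lemma pvLen_pyDigits (m : Nat) (h : 1 ≤ m) :
    PySem.List.len (pyDigits (m : Int)) = ((Nat.digits 10 m).length : Int) := by
  rw [PySem.List.len_eq, pvPyDigits_eq m h]; simp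

-- termination: for n ≥ 10, n % 10 ** (len(str(n)) - 1) < n
lemma pvF_dec (n : Int) (h : ¬ n < 10) :
    (PySem.Int.mod n (10 ^ (PySem.List.len (pyDigits n) - 1).toNat)).toNat < n.toNat := by
  have hm : n = ((n.toNat : Nat) : Int) := by omega
  set m : Nat := n.toNat with hmdef
  have h10 : 10 ≤ m := by omega
  have hL : 2 ≤ (Nat.digits 10 m).length := by
    have hs : 10 ^ 1 ≤ m := by rw [pow_one]; exact h10
    have := (Nat.lt_digits_length_iff (by norm_num) m).mpr hs
    omega
  have hlen : PySem.List.len (pyDigits n) = ((Nat.digits 10 m).length : Int) := by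
    rw [hm]; exact pvLen_pyDigits m (by omega)
  set L : Nat := (Nat.digits 10 m).length with hLdef
  have hTN : (PySem.List.len (pyDigits n) - 1).toNat = L - 1 := by rw [hlen]; omega
  have hple : 10 ^ (L - 1) ≤ m :=
    (Nat.lt_digits_length_iff (by norm_num) m).mp (by omega)
  have hcast : (10 : Int) ^ (L - 1) = ((10 ^ (L - 1) : Nat) : Int) := by push_cast; rfl
  rw [hTN, hm, hcast, PySem.Int.mod_natCast]
  have hpos : 0 < 10 ^ (L - 1) := Nat.pow_pos (by norm_num)
  have := Nat.mod_lt m hpos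
  omega

def f (n : Int) : Int :=
  if n < 10 then n
  else
    let s := pyDigits n
    let q := max 1 (PySem.List.pyGetD s 0 0 - 1) * 9 ^ (PySem.List.len s - 1).toNat
    -- Python's 9 ** e and 10 ** e: e = len(s) - 1 ≥ 0 here, so ^ on the Nat exponent is exact
    let w := PySem.List.pyGetD s 0 0 * f (PySem.Int.mod n (10 ^ (PySem.List.len s - 1).toNat))
    max q w
termination_by n.toNat
decreasing_by exact pvF_dec n (by assumption)

-- ===== PORT B =====
-- loop body of Source B: state (best, p, rem); rem ≥ 0 throughout, so 9 ** rem is 9 ^ rem.toNat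
def altStep (st : Int × Int × Int) (d : Int) : Int × Int × Int :=
  let rem := st.2.2 - 1
  (max st.1 (st.2.1 * max 1 (d - 1) * 9 ^ rem.toNat), st.2.1 * d, rem)

def f_alt (n : Int) : Int :=
  if n < 10 then n
  else
    let s := pyDigits n
    let r := s.foldl altStep (0, 1, PySem.List.len s)
    max r.1 r.2.1

-- ===== PRECONDITION & SPEC =====
def Spec_f (n : Int) (out : Int) : Prop := out = f_alt n
instance (n : Int) (out : Int) : Decidable (Spec_f n out) := by unfold Spec_f; infer_instance

-- ===== CLAIM (what is proved, stated in full; the proofs are below) =====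
def Claim_equal_f : Prop := ∀ (n : Int), Dom_f n → Spec_f n (f n)

-- ===== LEMMAS AND PROOFS =====

-- recursive characterisation of B's candidate maximum over a digit list (most significant first)
def pvG : List Int → Int
  | [] => 1
  | d :: t => max (max 1 (d - 1) * 9 ^ t.length) (d * pvG t)

lemma pvG_nonneg (t : List Int) (h : ∀ x ∈ t, 0 ≤ x) : 0 ≤ pvG t := by
  induction t with
  | nil => norm_num [pvG]
  | cons d u ih =>
    have h1 : (0 : Int) ≤ max 1 (d - 1) * 9 ^ u.length :=
      mul_nonneg (le_trans zero_le_one (le_max_left _ _)) (by positivity)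
    exact le_trans h1 (le_max_left _ _)

lemma pvG_le (t : List Int) (h0 : ∀ x ∈ t, 0 ≤ x) (h9 : ∀ x ∈ t, x ≤ 9) :
    pvG t ≤ 9 ^ t.length := by
  induction t with
  | nil => norm_num [pvG]
  | cons d u ih =>
    have hd0 : 0 ≤ d := h0 d (by simp)
    have hd9 : d ≤ 9 := h9 d (by simp)
    have hu0 : ∀ x ∈ u, 0 ≤ x := fun x hx => h0 x (by simp [hx])
    have hu9 : ∀ x ∈ u, x ≤ 9 := fun x hx => h9 x (by simp [hx])
    have hG0 : 0 ≤ pvG u := pvG_nonneg u hu0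
    have hGle : pvG u ≤ 9 ^ u.length := ih hu0 hu9
    have hpow : (0:Int) ≤ 9 ^ u.length := by positivity
    have h1 : max 1 (d - 1) * 9 ^ u.length ≤ 9 * 9 ^ u.length :=
      mul_le_mul_of_nonneg_right (by omega) hpow
    have h2 : d * pvG u ≤ 9 * 9 ^ u.length := mul_le_mul hd9 hGle hG0 (by norm_num)
    simp only [pvG, List.length_cons, pow_succ]
    calc max (max 1 (d - 1) * 9 ^ u.length) (d * pvG u) ≤ 9 * 9 ^ u.length := by
          exact max_le h1 h2
      _ = 9 ^ u.length * 9 := by ring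

-- B's fold computes max best (p * pvG t) when the rem component starts at |t|
lemma pvLoop_eq : ∀ (t : List Int) (best p c : Int), 0 ≤ p → (∀ x ∈ t, 0 ≤ x) →
    c = (t.length : Int) →
    max (t.foldl altStep (best, p, c)).1 (t.foldl altStep (best, p, c)).2.1
      = max best (p * pvG t) := by
  intro t
  induction t with
  | nil => intro best p c hp hx hc; simp [pvG]
  | cons d u ih =>
    intro best p c hp hx hc
    have hd0 : 0 ≤ d := hx d (by simp)
    have hrem : c - 1 = (u.length : Int) := by simp at hc; omega
    have hremN : (c - 1).toNat = u.length := by omega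
    simp only [List.foldl_cons, altStep, hremN]
    rw [ih (max best (p * max 1 (d - 1) * 9 ^ u.length)) (p * d) (c - 1)
      (mul_nonneg hp hd0) (fun x hxm => hx x (by simp [hxm])) hrem]
    rw [max_assoc, mul_assoc p (max 1 (d - 1)) (9 ^ u.length), mul_assoc p d (pvG u),
      ← mul_max_of_nonneg _ _ hp, pvG]

lemma pvF_alt_eq (n : Int) (h : ¬ n < 10) : f_alt n = pvG (pyDigits n) := by
  have hm : n = ((n.toNat : Nat) : Int) := by omega
  have hx : ∀ x ∈ pyDigits n, 0 ≤ x := by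
    rw [hm, pvPyDigits_eq n.toNat (by omega)]
    intro x hxm
    simp only [List.mem_map] at hxm
    obtain ⟨d, _, rfl⟩ := hxm
    positivity
  unfold f_alt
  rw [if_neg h]
  rw [pvLoop_eq (pyDigits n) 0 1 (PySem.List.len (pyDigits n)) (by norm_num) hx
    (by simp [PySem.List.len_eq]), one_mul]
  exact max_eq_right (pvG_nonneg _ hx)

-- main induction: for m ≥ 1, A's recursion equals pvG of the digit list of m
lemma pvMain : ∀ m : Nat, 1 ≤ m →
    f (m : Int) = pvG ((Nat.digits 10 m).reverse.map (Nat.cast : ℕ → ℤ)) := by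
  intro m
  induction m using Nat.strong_induction_on with
  | _ m IH =>
    intro h1
    by_cases hsmall : m < 10
    · unfold f
      rw [if_pos (by exact_mod_cast hsmall), Nat.digits_of_lt 10 m (by omega) hsmall]
      simp only [List.reverse_cons, List.reverse_nil, List.nil_append, List.map_cons,
        List.map_nil, pvG, List.length_nil, pow_zero, mul_one]
      omega
    · -- m ≥ 10
      have h10 : 10 ≤ m := by omega
      set L : Nat := (Nat.digits 10 m).length with hLdef
      have hL : 2 ≤ L := by
        have hs : 10 ^ 1 ≤ m := by rw [pow_one]; exact h10
        have := (Nat.lt_digits_length_iff (by norm_num) m).mpr hs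
        omega
      set d : Nat := m / 10 ^ (L - 1) with hddef
      set v : Nat := m % 10 ^ (L - 1) with hvdef
      have hple : 10 ^ (L - 1) ≤ m :=
        (Nat.lt_digits_length_iff (by norm_num) m).mp (by omega)
      have hmlt : m < 10 ^ L := Nat.lt_base_pow_length_digits (by norm_num)
      have hd1 : 1 ≤ d := (Nat.one_le_div_iff (Nat.pow_pos (by norm_num))).mpr hple
      have hd9 : d ≤ 9 := by
        have hp : 10 ^ L = 10 ^ (L - 1) * 10 := by
          rw [← pow_succ]; congr 1; omega
        have hd10 : d < 10 := by
          rw [hddef]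
          exact (Nat.div_lt_iff_lt_mul (Nat.pow_pos (by norm_num))).mpr (by omega)
        omega
      have hv : v < 10 ^ (L - 1) := Nat.mod_lt m (Nat.pow_pos (by norm_num))
      have hlenv : (Nat.digits 10 v).length ≤ L - 1 :=
        (Nat.digits_length_le_iff (by norm_num) v).mpr hv
      set k : Nat := L - 1 - (Nat.digits 10 v).length with hkdef
      have hsplit : Nat.digits 10 m = Nat.digits 10 v ++ List.replicate k 0 ++ [d] := by
        have hz := Nat.digits_append_zeroes_append_digits (b := 10) (k := k) (m := d) (n := v)
          (by norm_num) (by omega)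
        rw [Nat.digits_of_lt 10 d (by omega) (by omega)] at hz
        rw [hz]
        congr 1
        have hlk : (Nat.digits 10 v).length + k = L - 1 := by omega
        rw [hlk, hvdef, hddef, Nat.mod_add_div m (10 ^ (L - 1))]
      have hrev : (Nat.digits 10 m).reverse =
          d :: (List.replicate k 0 ++ (Nat.digits 10 v).reverse) := by
        rw [hsplit]; simp
      -- digit list bounds for v
      have hv0 : ∀ x ∈ (Nat.digits 10 v).reverse.map (Nat.cast : ℕ → ℤ), 0 ≤ x := by
        intro x hx; simp only [List.mem_map] at hx; obtain ⟨e, _, rfl⟩ := hx; positivity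
      have hv9 : ∀ x ∈ (Nat.digits 10 v).reverse.map (Nat.cast : ℕ → ℤ), x ≤ 9 := by
        intro x hx
        simp only [List.mem_map, List.mem_reverse] at hx
        obtain ⟨e, he, rfl⟩ := hx
        have := Nat.digits_lt_base (by norm_num : (1:ℕ) < 10) he
        omega
      -- unfold f at m
      have hnot : ¬ ((m : Int) < 10) := by exact_mod_cast not_lt.mpr h10
      have hpy : pyDigits (m : Int) = (Nat.digits 10 m).reverse.map (Nat.cast : ℕ → ℤ) :=
        pvPyDigits_eq m (by omega)
      have hlen : PySem.List.len (pyDigits (m : Int)) = (L : Int) := pvLen_pyDigits m (by omega)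
      have hTN : (PySem.List.len (pyDigits (m : Int)) - 1).toNat = L - 1 := by
        rw [hlen]; omega
      have hhead : PySem.List.pyGetD (pyDigits (m : Int)) 0 0 = (d : Int) := by
        rw [hpy, hrev]; simp [PySem.List.pyGetD_zero_cons]
      have hmod : PySem.Int.mod (m : Int) (10 ^ (L - 1)) = (v : Int) := by
        have hcast : (10 : Int) ^ (L - 1) = ((10 ^ (L - 1) : Nat) : Int) := by push_cast; rfl
        rw [hcast, PySem.Int.mod_natCast]
      unfold f
      rw [if_neg hnot]
      simp only [hTN, hhead, hmod]
      -- the right-hand side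
      rw [hrev]
      simp only [List.map_cons, pvG, List.length_map, List.length_append,
        List.length_replicate, List.length_reverse]
      have hlentail : k + (Nat.digits 10 v).length = L - 1 := by omega
      rw [hlentail]
      rcases Nat.eq_zero_or_pos k with hk0 | hkpos
      · -- no leading zeros in the tail: tail is exactly the digit list of v
        have hvne : v ≠ 0 := by
          intro hv0'
          have : (Nat.digits 10 v).length = 0 := by rw [hv0']; simp
          omega
        rw [hk0]
        simp only [List.replicate_zero, List.nil_append]
        rw [IH v (by omega) (by omega)]
      · -- the tail starts with a zero digit: both branches are dominated by q
        have hcons : List.replicate k (0:ℕ) ++ (Nat.digits 10 v).reverse =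
            0 :: (List.replicate (k - 1) 0 ++ (Nat.digits 10 v).reverse) := by
          rw [show k = (k - 1) + 1 by omega, List.replicate_succ]
          simp
        rw [hcons]
        simp only [List.map_cons, pvG, Nat.cast_zero, List.length_map, List.length_append,
          List.length_replicate, List.length_reverse, zero_mul]
        have hlu : k - 1 + (Nat.digits 10 v).length = L - 2 := by omega
        rw [hlu]
        have hmax0 : max (max 1 ((0:Int) - 1) * 9 ^ (L - 2)) 0 = 9 ^ (L - 2) := by
          have h01 : max 1 ((0:Int) - 1) = 1 := by omega
          rw [h01, one_mul]
          exact max_eq_left (by positivity)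
        rw [hmax0]
        have hdcast1 : (1 : Int) ≤ (d : Int) := by exact_mod_cast hd1
        have hdcast9 : (d : Int) ≤ 9 := by exact_mod_cast hd9
        have hfv0 : 0 ≤ f (v : Int) ∧ f (v : Int) ≤ 9 ^ (L - 2) := by
          rcases Nat.eq_zero_or_pos v with hv0' | hvpos
          · have hf0 : f ((v : Nat) : Int) = 0 := by
              rw [hv0']
              unfold f
              norm_num
            rw [hf0]
            exact ⟨le_refl 0, by positivity⟩
          · rw [IH v (by omega) (by omega)]
            refine ⟨pvG_nonneg _ hv0, le_trans (pvG_le _ hv0 hv9) ?_⟩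
            simp only [List.length_map, List.length_reverse]
            have hlv2 : (Nat.digits 10 v).length ≤ L - 2 := by omega
            exact pow_le_pow_right₀ (by norm_num) hlv2
        have hdle : (d : Int) ≤ max 1 ((d : Int) - 1) * 9 := by
          rcases le_or_gt ((d : Int) - 1) 1 with hc | hc
          · rw [max_eq_left hc]; omega
          · rw [max_eq_right hc.le]; omega
        have hp2 : (9:Int) ^ (L - 1) = 9 * 9 ^ (L - 2) := by
          rw [show L - 1 = (L - 2) + 1 by omega, pow_succ]; ring
        have hq : (d : Int) * 9 ^ (L - 2) ≤ max 1 ((d : Int) - 1) * 9 ^ (L - 1) := by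
          calc (d : Int) * 9 ^ (L - 2) ≤ (max 1 ((d : Int) - 1) * 9) * 9 ^ (L - 2) :=
                mul_le_mul_of_nonneg_right hdle (by positivity)
            _ = max 1 ((d : Int) - 1) * 9 ^ (L - 1) := by rw [hp2]; ring
        have hqf : (d : Int) * f (v : Int) ≤ max 1 ((d : Int) - 1) * 9 ^ (L - 1) := by
          calc (d : Int) * f (v : Int) ≤ (d : Int) * 9 ^ (L - 2) :=
                mul_le_mul_of_nonneg_left hfv0.2 (by omega)
            _ ≤ _ := hq
        rw [max_eq_left hqf, max_eq_left hq]

-- ===== VERDICT (by name: the statement is the Claim_ definition above) =====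
theorem f_spec : Claim_equal_f := by
  intro n _
  unfold Spec_f
  by_cases hn : n < 10
  · unfold f f_alt
    rw [if_pos hn, if_pos hn]
  · have hm : n = ((n.toNat : Nat) : Int) := by omega
    rw [pvF_alt_eq n hn, hm, pvPyDigits_eq n.toNat (by omega)]
    exact pvMain n.toNat (by omega)
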